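-- pv_equiv track=rewrite | github.com/dnaforge/xdsd | xdsd-desktop/DSDPy/src/basics/lexical_analyzer.py | lexer_site
-- ===== SOURCE A (Python) =====
-- def lexer_site(string):
--     sites = []
--     name = ''
--
--     for i in range(1, len(string) - 1):
--         ch = string[i]
--
--         if 'a' <= ch <= 'z' or 'A' <= ch <= 'Z' or '0' <= ch <= '9':
--             name += ch
--             continue
--
--         if ch == '*':
--             name += '_p'
--             continue
--
--         if ch == '!':
--             name += '_'
--             continue
--
--         if ch == ' ':
--             sites.append(name)
--             name = ''
--             continue
--
--     sites.append(name)
--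
--     return sites
-- ===== SOURCE B (Python) =====
-- def lexer_site(string):
--     def tr(ch):
--         if ch.isalnum():
--             return ch
--         if ch == '*':
--             return '_p'
--         if ch == '!':
--             return '_'
--         return ''
--     return [''.join(tr(ch) for ch in seg) for seg in string[1:-1].split(' ')]
-- ===== Notes on version B (the rewrite author's own statement) =====
-- stated objective: idiomatic
-- what changed: Replaced the index loop with its space-branch state machine (accumulator string flushed on ' ') by slicing string[1:-1], splitting on a single space, and mapping a per-character translation over each segment.
import Mathlib
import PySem

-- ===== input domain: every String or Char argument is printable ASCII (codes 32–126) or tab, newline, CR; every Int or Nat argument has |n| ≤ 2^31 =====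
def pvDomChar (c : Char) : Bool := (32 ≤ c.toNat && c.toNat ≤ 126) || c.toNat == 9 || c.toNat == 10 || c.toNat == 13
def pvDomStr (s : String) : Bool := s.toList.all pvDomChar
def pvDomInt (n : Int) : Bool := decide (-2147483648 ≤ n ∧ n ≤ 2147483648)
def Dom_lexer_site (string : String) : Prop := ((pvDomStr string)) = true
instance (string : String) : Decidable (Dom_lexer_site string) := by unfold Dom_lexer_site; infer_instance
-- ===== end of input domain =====

-- B replaces A's index loop with its flush-on-space state machine by string[1:-1].split(' ')
-- plus a per-character translation mapped over each segment (idiomatic; same cost).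

-- ===== PORT A =====
-- A's alphanumeric test: 'a' <= ch <= 'z' or 'A' <= ch <= 'Z' or '0' <= ch <= '9'
def lexerAlnumA (ch : Char) : Bool :=
  (decide ('a' ≤ ch) && decide (ch ≤ 'z')) || (decide ('A' ≤ ch) && decide (ch ≤ 'Z'))
    || (decide ('0' ≤ ch) && decide (ch ≤ '9'))

-- A's loop body, on the character string[i] (state = (sites, name) as char lists)
def lexerStepA (st : List (List Char) × List Char) (ch : Char) : List (List Char) × List Char :=
  if lexerAlnumA ch then (st.1, st.2 ++ [ch])
  else if ch = '*' then (st.1, st.2 ++ ['_', 'p'])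
  else if ch = '!' then (st.1, st.2 ++ ['_'])
  else if ch = ' ' then (st.1 ++ [st.2], [])
  else st

def lexer_site (string : String) : List String :=
  let cs := string.toList
  -- for i in range(1, len(string) - 1): ch = string[i]; … (the index is always in range,
  -- so the pyGetD default is never read)
  let st := (PySem.List.pyRange 1 (PySem.List.len cs - 1)).foldl
    (fun st i => lexerStepA st (PySem.List.pyGetD cs i ' ')) ([], [])
  (st.1 ++ [st.2]).map String.ofList

-- ===== PORT B =====
-- tr(ch) of Source B
def lexerTrB (ch : Char) : List Char :=
  if PySem.Chars.isalnum ch then [ch]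
  else if ch = '*' then ['_', 'p']
  else if ch = '!' then ['_']
  else []

def lexer_site_alt (string : String) : List String :=
  (PySem.Chars.splitOn (PySem.List.slice string.toList (some 1) (some (-1))) [' ']).map
    (fun seg => String.ofList (seg.flatMap lexerTrB))

-- ===== PRECONDITION & SPEC =====
def Spec_lexer_site (string : String) (out : List String) : Prop := out = lexer_site_alt string
instance (string : String) (out : List String) : Decidable (Spec_lexer_site string out) := by unfold Spec_lexer_site; infer_instance

-- ===== CLAIM (what is proved, stated in full; the proofs are below) =====
def Claim_equal_lexer_site : Prop := ∀ (string : String), Dom_lexer_site string → Spec_lexer_site string (lexer_site string)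

-- ===== LEMMAS AND PROOFS =====

-- single-space split, in the structural form the induction needs
def splitSp : List Char → List (List Char)
  | [] => [[]]
  | a :: s =>
    if a = ' ' then [] :: splitSp s
    else match splitSp s with
      | [] => [[a]]
      | t :: ts => (a :: t) :: ts

theorem splitSp_ne_nil (cs : List Char) : splitSp cs ≠ [] := by
  cases cs with
  | nil => simp [splitSp]
  | cons a s =>
    simp only [splitSp]
    split_ifs
    · simp
    · cases h : splitSp s <;> simp

theorem go_space (fuel : Nat) : ∀ (s cur : List Char) (acc : List (List Char)),
    s.length < fuel →
    PySem.Chars.splitOn.go [' '] fuel s cur acc =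
      acc.reverse ++ (match splitSp s with
        | [] => [cur.reverse]
        | t :: ts => (cur.reverse ++ t) :: ts) := by
  induction fuel with
  | zero => intro s cur acc h; omega
  | succ fuel ih =>
    intro s cur acc h
    cases s with
    | nil =>
      rw [PySem.Chars.splitOn.go.eq_def]
      simp [splitSp]
    | cons c rest =>
      rw [PySem.Chars.splitOn.go.eq_def]
      simp only
      by_cases hc : c = ' '
      · have hp : List.isPrefixOf [' '] (c :: rest) = true := by
          simp [List.isPrefixOf, hc]
        rw [if_pos hp]
        rw [show List.drop [' '].length (c :: rest) = rest from rfl]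
        rw [ih rest [] (cur.reverse :: acc) (by simpa using Nat.lt_of_succ_lt_succ h)]
        have hs : splitSp (c :: rest) = [] :: splitSp rest := by simp [splitSp, hc]
        rw [hs]
        cases hr : splitSp rest with
        | nil => exact absurd hr (splitSp_ne_nil rest)
        | cons t ts => simp
      · have hp : List.isPrefixOf [' '] (c :: rest) = false := by
          simp [List.isPrefixOf]; intro h'; exact hc h'.symm
        rw [if_neg (by simp [hp])]
        rw [ih rest (c :: cur) acc (by simpa using Nat.lt_of_succ_lt_succ h)]
        have hs : splitSp (c :: rest) =
            (match splitSp rest with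
              | [] => [[c]]
              | t :: ts => (c :: t) :: ts) := by simp [splitSp, hc]
        rw [hs]
        cases hr : splitSp rest with
        | nil => exact absurd hr (splitSp_ne_nil rest)
        | cons t ts => simp

theorem splitOn_space (cs : List Char) : PySem.Chars.splitOn cs [' '] = splitSp cs := by
  unfold PySem.Chars.splitOn
  rw [go_space (cs.length + 1) cs [] [] (by omega)]
  cases hr : splitSp cs with
  | nil => exact absurd hr (splitSp_ne_nil cs)
  | cons t ts => simp

-- A's ranges coincide with Python's str.isalnum as modelled by PySem
theorem alnum_eq (ch : Char) : lexerAlnumA ch = PySem.Chars.isalnum ch := by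
  simp only [lexerAlnumA, PySem.Chars.isalnum, PySem.Chars.isalpha, PySem.Chars.isdigit,
    PySem.Chars.isupper, PySem.Chars.islower]
  ac_rfl

-- B's transform of one segment
def trSeg (s : List Char) : List Char := s.flatMap lexerTrB

-- the name accumulator prepended into the first transformed segment
def consTr (name : List Char) : List (List Char) → List (List Char)
  | [] => [name]
  | t :: ts => (name ++ trSeg t) :: ts.map trSeg

-- invariant of A's character loop
theorem loopA (ys : List Char) : ∀ (sites : List (List Char)) (name : List Char),
    (let st := ys.foldl lexerStepA (sites, name); st.1 ++ [st.2]) =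
      sites ++ consTr name (splitSp ys) := by
  induction ys with
  | nil => intro sites name; simp [splitSp, consTr, trSeg]
  | cons c rest ih =>
    intro sites name
    simp only [List.foldl_cons]
    by_cases ha : lexerAlnumA c = true
    · have hc : ¬ c = ' ' := by intro h; subst h; simp [lexerAlnumA] at ha
      rw [show lexerStepA (sites, name) c = (sites, name ++ [c]) by
        simp [lexerStepA, ha]]
      rw [ih sites (name ++ [c])]
      have hs : splitSp (c :: rest) =
          (match splitSp rest with
            | [] => [[c]]
            | t :: ts => (c :: t) :: ts) := by simp [splitSp, hc]
      rw [hs]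
      cases hr : splitSp rest with
      | nil => exact absurd hr (splitSp_ne_nil rest)
      | cons t ts =>
        simp only [consTr]
        have : trSeg (c :: t) = c :: trSeg t := by
          simp [trSeg, lexerTrB, ← alnum_eq, ha]
        rw [this]; simp
    · by_cases hst : c = '*'
      · subst hst
        rw [show lexerStepA (sites, name) '*' = (sites, name ++ ['_', 'p']) by
          simp [lexerStepA, ha]]
        rw [ih sites (name ++ ['_', 'p'])]
        have hs : splitSp ('*' :: rest) =
            (match splitSp rest with
              | [] => [['*']]
              | t :: ts => ('*' :: t) :: ts) := by simp [splitSp]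
        rw [hs]
        cases hr : splitSp rest with
        | nil => exact absurd hr (splitSp_ne_nil rest)
        | cons t ts =>
          simp only [consTr]
          have : trSeg ('*' :: t) = '_' :: 'p' :: trSeg t := by
            simp [trSeg, lexerTrB, ← alnum_eq, ha]
          rw [this]; simp
      · by_cases hex : c = '!'
        · subst hex
          rw [show lexerStepA (sites, name) '!' = (sites, name ++ ['_']) by
            simp [lexerStepA, ha]]
          rw [ih sites (name ++ ['_'])]
          have hs : splitSp ('!' :: rest) =
              (match splitSp rest with
                | [] => [['!']]
                | t :: ts => ('!' :: t) :: ts) := by simp [splitSp]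
          rw [hs]
          cases hr : splitSp rest with
          | nil => exact absurd hr (splitSp_ne_nil rest)
          | cons t ts =>
            simp only [consTr]
            have : trSeg ('!' :: t) = '_' :: trSeg t := by
              simp [trSeg, lexerTrB, ← alnum_eq, ha]
            rw [this]; simp
        · by_cases hsp : c = ' '
          · subst hsp
            rw [show lexerStepA (sites, name) ' ' = (sites ++ [name], []) by
              simp [lexerStepA, ha]]
            rw [ih (sites ++ [name]) []]
            have hs : splitSp (' ' :: rest) = [] :: splitSp rest := by simp [splitSp]
            rw [hs]
            cases hr : splitSp rest with
            | nil => exact absurd hr (splitSp_ne_nil rest)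
            | cons t ts => simp [consTr, trSeg]
          · rw [show lexerStepA (sites, name) c = (sites, name) by
              simp [lexerStepA, ha, hst, hex, hsp]]
            rw [ih sites name]
            have hs : splitSp (c :: rest) =
                (match splitSp rest with
                  | [] => [[c]]
                  | t :: ts => (c :: t) :: ts) := by simp [splitSp, hsp]
            rw [hs]
            cases hr : splitSp rest with
            | nil => exact absurd hr (splitSp_ne_nil rest)
            | cons t ts =>
              simp only [consTr]
              have : trSeg (c :: t) = trSeg t := by
                simp [trSeg, lexerTrB, ← alnum_eq, ha, hst, hex]
              rw [this]

theorem slice_one_neg_one (cs : List Char) :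
    PySem.List.slice cs (some 1) (some (-1)) = cs.tail.dropLast := by
  simp only [PySem.List.slice, PySem.List.clampIdx]
  rcases cs with _ | ⟨a, t⟩
  · simp
  · have h1 : ¬ ((1 : Int) < 0) := by omega
    have h3 : ¬ ((t.length : Int) < 0) := by omega
    simp [h1, h3, List.dropLast_eq_take]

-- ===== VERDICT (by name: the statement is the Claim_ definition above) =====
theorem drop_one_dropLast (cs : List Char) : cs.dropLast.drop 1 = cs.tail.dropLast := by
  simp [List.dropLast_eq_take, List.drop_take]

theorem lexer_site_spec : Claim_equal_lexer_site := by
  intro string _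
  unfold Spec_lexer_site lexer_site lexer_site_alt
  simp only []
  set cs := string.toList with hcs
  have hrange : PySem.List.pyRange 1 (PySem.List.len cs - 1)
      = PySem.List.pyRange 1 (PySem.List.len cs.dropLast) := by
    cases cs with
    | nil => rw [PySem.List.pyRange_one_eq_nil (by simp [PySem.List.len]),
        PySem.List.pyRange_one_eq_nil (by simp [PySem.List.len])]
    | cons a t =>
      congr 1
      simp [PySem.List.len]
  rw [hrange]
  have hcong : List.foldl (fun st i => lexerStepA st (PySem.List.pyGetD cs i ' ')) ([], [])
        (PySem.List.pyRange 1 (PySem.List.len cs.dropLast))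
      = List.foldl (fun st i => lexerStepA st (PySem.List.pyGetD cs.dropLast i ' ')) ([], [])
        (PySem.List.pyRange 1 (PySem.List.len cs.dropLast)) := by
    refine PySem.List.foldl_congr_mem _ _ _ _ ?_
    intro acc i hi
    have hi' := PySem.List.mem_pyRange_one.mp hi
    have hlen : (PySem.List.len cs.dropLast) = (cs.dropLast.length : Int) := by
      simp [PySem.List.len]
    rw [hlen] at hi'
    have h0 : (0 : Int) ≤ i := by omega
    have h1 : i < (cs.dropLast.length : Int) := hi'.2
    have hdl : cs.dropLast.length = cs.length - 1 := List.length_dropLast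
    have h2 : i < (cs.length : Int) := by omega
    congr 1
    rw [PySem.List.pyGetD_eq_getElem cs ' ' h0 (by omega),
      PySem.List.pyGetD_eq_getElem cs.dropLast ' ' h0 (by omega)]
    exact (List.getElem_dropLast (by omega)).symm
  rw [hcong]
  rw [PySem.List.foldl_pyRange_pyGetD cs.dropLast ' ' lexerStepA ([], []) (by norm_num : (0:Int) ≤ 1)]
  have hys : cs.dropLast.drop (1 : Int).toNat = cs.tail.dropLast := by
    simpa using drop_one_dropLast cs
  rw [hys]
  rw [loopA cs.tail.dropLast [] []]
  rw [slice_one_neg_one, splitOn_space]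
  cases hr : splitSp cs.tail.dropLast with
  | nil => exact absurd hr (splitSp_ne_nil _)
  | cons t ts => simp [consTr, trSeg]
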